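-- pv_equiv track=rewrite | github.com/gamalahmed3265/Codeforces-Problem-Solving | sheet 9 C. Dragons/main.py | dragons
-- ===== SOURCE A (Python) =====
-- def dragons(s:int,listofDragons:list):
--     listofDragons.sort(key=lambda x:x[0])
--     for x,y in listofDragons:
--         if s>x:
--             s+=y
--         else:
--             return "NO"
--
--     return "YES"
-- ===== SOURCE B (Python) =====
-- def dragons(s, listofDragons):
--     # Selection-based: no sorting; repeatedly extract the first weakest remaining dragon.
--     remaining = listofDragons[:]
--     while remaining:
--         # linear scan for the first weakest remaining dragon
--         best, bi, i = remaining[0], 0, 0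
--         for d in remaining:
--             if d[0] < best[0]:
--                 best, bi = d, i
--             i += 1
--         x, y = remaining.pop(bi)
--         if s > x:
--             s += y
--         else:
--             return "NO"
--     return "YES"
-- ===== Notes on version B (the rewrite author's own statement) =====
-- stated objective: alternative
-- what changed: A sorts the dragons by strength and then scans them once; B never sorts: it repeatedly does a linear scan to extract the first weakest remaining dragon and fights it (selection-based greedy).
import Mathlib
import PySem

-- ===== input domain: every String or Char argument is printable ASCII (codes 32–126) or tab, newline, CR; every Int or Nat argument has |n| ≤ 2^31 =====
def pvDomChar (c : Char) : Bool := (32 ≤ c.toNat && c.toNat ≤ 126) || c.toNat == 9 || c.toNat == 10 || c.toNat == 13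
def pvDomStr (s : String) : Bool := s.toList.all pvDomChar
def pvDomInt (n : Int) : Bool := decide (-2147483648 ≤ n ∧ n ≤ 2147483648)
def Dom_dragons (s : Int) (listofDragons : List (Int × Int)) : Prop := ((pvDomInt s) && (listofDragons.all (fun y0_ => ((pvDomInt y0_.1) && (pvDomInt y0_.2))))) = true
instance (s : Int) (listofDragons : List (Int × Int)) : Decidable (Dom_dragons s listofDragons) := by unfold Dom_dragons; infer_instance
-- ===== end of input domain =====

-- B replaces A's sort-then-scan greedy by a selection-based greedy: it never sorts, but
-- repeatedly extracts the first weakest remaining dragon by a linear scan (alternative algorithm).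
-- Side effects differ: A sorts its list argument in place, B works on a copy and leaves the
-- argument untouched; the equivalence proved here is about the return value only.


-- ===== PORT A =====
-- A's for-loop with early return, over the list sorted by dragon strength
def dragonsLoop (s : Int) : List (Int × Int) → String
  | [] => "YES"
  | (x, y) :: rest => if s > x then dragonsLoop (s + y) rest else "NO"

def dragons (s : Int) (listofDragons : List (Int × Int)) : String :=
  dragonsLoop s (PySem.List.sorted listofDragons (fun p => p.1) false)

-- ===== PORT B =====
-- Source B's inner 'for d in remaining' scan: state (best, bi, i); i counts elements seen
def scanStep (st : (Int × Int) × Nat × Nat) (d : Int × Int) : (Int × Int) × Nat × Nat :=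
  if d.1 < st.1.1 then (d, st.2.2, st.2.2 + 1) else (st.1, st.2.1, st.2.2 + 1)

-- Source B's while loop: scan for the first weakest remaining dragon, pop it, fight it.
-- The fuel (seeded with the list length, which the pop decreases by one each turn) only
-- makes the recursion structural; the 'fuel ran out' and 'pop? out of range' arms are unreachable.
def dragonsAltGo : Nat → Int → List (Int × Int) → String
  | _, _, [] => "YES"
  | 0, _, _ :: _ => "NO"
  | fuel + 1, s, d :: t =>
    let st := (d :: t).foldl scanStep (d, 0, 0)
    match PySem.List.pop? (d :: t) (st.2.1 : Int) with
    | some ((x, y), rest) => if s > x then dragonsAltGo fuel (s + y) rest else "NO"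
    | none => "NO"

def dragons_alt (s : Int) (listofDragons : List (Int × Int)) : String :=
  dragonsAltGo listofDragons.length s listofDragons

-- ===== PRECONDITION & SPEC =====
def Spec_dragons (s : Int) (listofDragons : List (Int × Int)) (out : String) : Prop := out = dragons_alt s listofDragons
instance (s : Int) (listofDragons : List (Int × Int)) (out : String) : Decidable (Spec_dragons s listofDragons out) := by unfold Spec_dragons; infer_instance

-- ===== CLAIM (what is proved, stated in full; the proofs are below) =====
def Claim_equal_dragons : Prop := ∀ (s : Int) (listofDragons : List (Int × Int)), Dom_dragons s listofDragons → Spec_dragons s listofDragons (dragons s listofDragons)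

-- ===== LEMMAS AND PROOFS =====

-- selection spec: best of a::t (first minimum by strength) together with its offset in a::t
def psel : (Int × Int) → List (Int × Int) → (Int × Int) × Nat
  | a, [] => (a, 0)
  | a, b :: t => if (psel b t).1.1 < a.1 then ((psel b t).1, (psel b t).2 + 1) else (a, 0)

theorem psel_fst_le (t : List (Int × Int)) (a : Int × Int) : (psel a t).1.1 ≤ a.1 := by
  cases t with
  | nil => simp [psel]
  | cons b t =>
    simp only [psel]
    split_ifs with h
    · simpa using h.le
    · simp

theorem psel_snd_le (t : List (Int × Int)) : ∀ a : Int × Int, (psel a t).2 ≤ t.length := by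
  induction t with
  | nil => intro a; simp [psel]
  | cons b t ih =>
    intro a
    simp only [psel]
    split_ifs with h
    · have := ih b; simp; omega
    · simp

theorem psel_getElem? (t : List (Int × Int)) : ∀ a : Int × Int,
    (a :: t)[(psel a t).2]? = some (psel a t).1 := by
  induction t with
  | nil => intro a; simp [psel]
  | cons b t ih =>
    intro a
    by_cases hc : (psel b t).1.1 < a.1
    · simp only [psel, if_pos hc]
      simpa using ih b
    · simp [psel, if_neg hc]

-- Source B's scan computes exactly psel: the best element and its absolute index
theorem foldl_scan_eq_psel (t : List (Int × Int)) : ∀ (a : Int × Int) (bi i : Nat),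
    t.foldl scanStep (a, bi, i) =
      ((psel a t).1, (if (psel a t).2 = 0 then bi else i + (psel a t).2 - 1), i + t.length) := by
  induction t with
  | nil => intro a bi i; simp [psel]
  | cons b t ih =>
    intro a bi i
    simp only [List.foldl_cons, scanStep]
    by_cases hb : b.1 < a.1
    · rw [if_pos (by simpa using hb), ih b i (i + 1)]
      have hm : (psel b t).1.1 < a.1 := lt_of_le_of_lt (psel_fst_le t b) hb
      have e2 : (if (psel b t).2 = 0 then i else i + 1 + (psel b t).2 - 1)
          = (if (psel b t).2 + 1 = 0 then bi else i + ((psel b t).2 + 1) - 1) := by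
        rw [if_neg (Nat.succ_ne_zero _)]
        split_ifs <;> omega
      have e3 : i + 1 + t.length = i + (t.length + 1) := by omega
      simp only [psel, if_pos hm, List.length_cons]
      rw [e2, e3]
    · rw [if_neg (by simpa using hb), ih a bi (i + 1)]
      -- relate psel a (b :: t) to psel a t when b does not beat a
      have hskip : (psel a (b :: t)).1 = (psel a t).1 ∧
          ((psel a t).2 = 0 → (psel a (b :: t)).2 = 0) ∧
          ((psel a t).2 ≠ 0 → (psel a (b :: t)).2 = (psel a t).2 + 1) := by
        cases t with
        | nil =>
          simp only [psel, if_neg hb]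
          simp
        | cons c t' =>
          by_cases hc : (psel c t').1.1 < a.1
          · have hcb : (psel c t').1.1 < b.1 := by omega
            have e1 : psel b (c :: t') = ((psel c t').1, (psel c t').2 + 1) := by
              simp only [psel, if_pos hcb]
            have e2 : psel a (c :: t') = ((psel c t').1, (psel c t').2 + 1) := by
              simp only [psel, if_pos hc]
            have e3 : psel a (b :: c :: t') = ((psel c t').1, (psel c t').2 + 2) := by
              show (if (psel b (c :: t')).1.1 < a.1 then
                ((psel b (c :: t')).1, (psel b (c :: t')).2 + 1) else (a, 0)) = _
              rw [e1]
              simp only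
              rw [if_pos hc]
            rw [e2, e3]
            simp
          · have e2 : psel a (c :: t') = (a, 0) := by
              simp only [psel, if_neg hc]
            have e3 : psel a (b :: c :: t') = (a, 0) := by
              show (if (psel b (c :: t')).1.1 < a.1 then
                ((psel b (c :: t')).1, (psel b (c :: t')).2 + 1) else (a, 0)) = _
              have hne : ¬ (psel b (c :: t')).1.1 < a.1 := by
                by_cases hcb : (psel c t').1.1 < b.1
                · have e1 : psel b (c :: t') = ((psel c t').1, (psel c t').2 + 1) := by
                    simp only [psel, if_pos hcb]
                  rw [e1]; exact hc
                · have e1 : psel b (c :: t') = (b, 0) := by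
                    simp only [psel, if_neg hcb]
                  rw [e1]; exact hb
              rw [if_neg hne]
            rw [e2, e3]
            simp
      obtain ⟨h1, h20, h2s⟩ := hskip
      have e2 : (if (psel a t).2 = 0 then bi else i + 1 + (psel a t).2 - 1)
          = (if (psel a (b :: t)).2 = 0 then bi else i + (psel a (b :: t)).2 - 1) := by
        by_cases hz : (psel a t).2 = 0
        · rw [h20 hz, hz]; simp
        · rw [h2s hz, if_neg hz, if_neg (by omega : ¬ (psel a t).2 + 1 = 0)]
          omega
      have e3 : i + 1 + t.length = i + (t.length + 1) := by omega
      rw [h1, e2, e3]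
      simp only [List.length_cons]

-- leftmost stable insert: x goes before the first element with key ≥ key x
def insL (x : Int × Int) : List (Int × Int) → List (Int × Int)
  | [] => [x]
  | y :: ys => if x.1 ≤ y.1 then x :: y :: ys else y :: insL x ys

theorem insertBy_insL_comm (x y : Int × Int) : ∀ acc : List (Int × Int),
    PySem.List.insertBy (fun a b => decide (a.1 < b.1)) y (insL x acc) =
      insL x (PySem.List.insertBy (fun a b => decide (a.1 < b.1)) y acc) := by
  intro acc
  induction acc with
  | nil =>
    simp only [insL, PySem.List.insertBy]
    by_cases h1 : y.1 < x.1
    · rw [if_pos (by simpa using h1)]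
      simp [not_le.mpr h1]
    · rw [if_neg (by simpa using h1)]
      simp [not_lt.mp h1]
  | cons a t ih =>
    by_cases hx : x.1 ≤ a.1
    · -- insL x (a :: t) = x :: a :: t
      rw [show insL x (a :: t) = x :: a :: t by simp [insL, hx]]
      by_cases hy : y.1 < a.1
      · by_cases hyx : y.1 < x.1
        · rw [show PySem.List.insertBy (fun a b => decide (a.1 < b.1)) y (x :: a :: t)
                = y :: x :: a :: t by simp [PySem.List.insertBy, hyx]]
          rw [show PySem.List.insertBy (fun a b => decide (a.1 < b.1)) y (a :: t)
                = y :: a :: t by simp [PySem.List.insertBy, hy]]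
          simp [insL, not_le.mpr hyx, hx]
        · rw [show PySem.List.insertBy (fun a b => decide (a.1 < b.1)) y (x :: a :: t)
                = x :: y :: a :: t by simp [PySem.List.insertBy, hyx, hy]]
          rw [show PySem.List.insertBy (fun a b => decide (a.1 < b.1)) y (a :: t)
                = y :: a :: t by simp [PySem.List.insertBy, hy]]
          simp [insL, not_lt.mp hyx]
      · have hyx : ¬ y.1 < x.1 := by omega
        rw [show PySem.List.insertBy (fun a b => decide (a.1 < b.1)) y (x :: a :: t)
              = x :: PySem.List.insertBy (fun a b => decide (a.1 < b.1)) y (a :: t) by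
                simp [PySem.List.insertBy, hyx]]
        rw [show PySem.List.insertBy (fun a b => decide (a.1 < b.1)) y (a :: t)
              = a :: PySem.List.insertBy (fun a b => decide (a.1 < b.1)) y t by
                simp [PySem.List.insertBy, hy]]
        simp [insL, hx]
    · -- insL x (a :: t) = a :: insL x t
      rw [show insL x (a :: t) = a :: insL x t by simp [insL, hx]]
      by_cases hy : y.1 < a.1
      · rw [show PySem.List.insertBy (fun a b => decide (a.1 < b.1)) y (a :: insL x t)
              = y :: a :: insL x t by simp [PySem.List.insertBy, hy]]
        rw [show PySem.List.insertBy (fun a b => decide (a.1 < b.1)) y (a :: t)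
              = y :: a :: t by simp [PySem.List.insertBy, hy]]
        have hxy : ¬ x.1 ≤ y.1 := by omega
        simp [insL, hxy, hx]
      · rw [show PySem.List.insertBy (fun a b => decide (a.1 < b.1)) y (a :: insL x t)
              = a :: PySem.List.insertBy (fun a b => decide (a.1 < b.1)) y (insL x t) by
                simp [PySem.List.insertBy, hy]]
        rw [show PySem.List.insertBy (fun a b => decide (a.1 < b.1)) y (a :: t)
              = a :: PySem.List.insertBy (fun a b => decide (a.1 < b.1)) y t by
                simp [PySem.List.insertBy, hy]]
        rw [show insL x (a :: PySem.List.insertBy (fun a b => decide (a.1 < b.1)) y t)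
              = a :: insL x (PySem.List.insertBy (fun a b => decide (a.1 < b.1)) y t) by
                simp [insL, hx]]
        rw [ih]

theorem foldl_insertBy_insL (xs : List (Int × Int)) : ∀ (x : Int × Int) (acc : List (Int × Int)),
    xs.foldl (fun acc' e => PySem.List.insertBy (fun a b => decide (a.1 < b.1)) e acc') (insL x acc) =
      insL x (xs.foldl (fun acc' e => PySem.List.insertBy (fun a b => decide (a.1 < b.1)) e acc') acc) := by
  induction xs with
  | nil => intro x acc; rfl
  | cons e xs ih =>
    intro x acc
    simp only [List.foldl_cons]
    rw [insertBy_insL_comm, ih]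

theorem sorted_cons (x : Int × Int) (xs : List (Int × Int)) :
    PySem.List.sorted (x :: xs) (fun p => p.1) false =
      insL x (PySem.List.sorted xs (fun p => p.1) false) := by
  rw [PySem.List.sorted_eq_foldl_insertBy, PySem.List.sorted_eq_foldl_insertBy]
  simp only [List.foldl_cons]
  have h0 : PySem.List.insertBy (fun a b : Int × Int => decide (a.1 < b.1)) x [] = insL x [] := rfl
  rw [h0]
  exact foldl_insertBy_insL xs x []

-- the head of the stable sort is the first weakest dragon; the tail is the sort of the rest
theorem sorted_eq_psel (t : List (Int × Int)) : ∀ a : Int × Int,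
    PySem.List.sorted (a :: t) (fun p => p.1) false =
      (psel a t).1 :: PySem.List.sorted ((a :: t).eraseIdx (psel a t).2) (fun p => p.1) false := by
  induction t with
  | nil =>
    intro a
    simp only [psel, List.eraseIdx]
    rw [sorted_cons]
    rfl
  | cons b t ih =>
    intro a
    rw [sorted_cons, ih b]
    by_cases hm : (psel b t).1.1 < a.1
    · rw [show psel a (b :: t) = ((psel b t).1, (psel b t).2 + 1) by simp only [psel, if_pos hm]]
      simp only [insL]
      rw [if_neg (not_le.mpr hm)]
      have herase : (a :: b :: t).eraseIdx ((psel b t).2 + 1) = a :: (b :: t).eraseIdx (psel b t).2 := rfl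
      rw [herase, sorted_cons]
    · rw [show psel a (b :: t) = (a, 0) by simp only [psel, if_neg hm]]
      simp only [insL]
      rw [if_pos (not_lt.mp hm)]
      simp only [List.eraseIdx]
      rw [ih b]

-- main loop equivalence, by induction on the fuel
theorem loop_eq_go (n : Nat) : ∀ (l : List (Int × Int)) (s : Int), l.length ≤ n →
    dragonsLoop s (PySem.List.sorted l (fun p => p.1) false) = dragonsAltGo n s l := by
  induction n with
  | zero =>
    intro l s hn
    have : l = [] := List.eq_nil_of_length_eq_zero (Nat.le_zero.mp hn)
    subst this
    simp [PySem.List.sorted, dragonsLoop, dragonsAltGo]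
  | succ n ih =>
    intro l s hn
    cases l with
    | nil => simp [PySem.List.sorted, dragonsLoop, dragonsAltGo]
    | cons d t =>
      rw [sorted_eq_psel t d]
      have hlt : (psel d t).2 < (d :: t).length := by
        have := psel_snd_le t d; simp; omega
      have hget : (d :: t)[(psel d t).2] = (psel d t).1 := by
        have h := psel_getElem? t d
        rw [List.getElem?_eq_getElem hlt] at h
        exact Option.some.inj h
      have hscan : ((d :: t).foldl scanStep (d, 0, 0)).2.1 = (psel d t).2 := by
        have hstep : scanStep (d, 0, 0) d = (d, 0, 1) := by simp [scanStep]
        simp only [List.foldl_cons, hstep]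
        rw [foldl_scan_eq_psel t d 0 1]
        simp only
        split_ifs with hz <;> omega
      have hpop : PySem.List.pop? (d :: t) (((d :: t).foldl scanStep (d, 0, 0)).2.1 : Int) =
          some ((psel d t).1, (d :: t).eraseIdx (psel d t).2) := by
        rw [hscan, PySem.List.pop?_natCast (d :: t) (psel d t).2 hlt, hget]
      have hlen : ((d :: t).eraseIdx (psel d t).2).length + 1 = (d :: t).length :=
        PySem.List.length_of_pop?_eq_some (d :: t) hpop
      rcases hps : (psel d t).1 with ⟨x, y⟩
      rw [hps] at hpop
      have hrhs : dragonsAltGo (n + 1) s (d :: t) =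
          (match PySem.List.pop? (d :: t) ((((d :: t).foldl scanStep (d, 0, 0)).2.1 : Nat) : Int) with
           | some ((x, y), rest) => if s > x then dragonsAltGo n (s + y) rest else "NO"
           | none => "NO") := rfl
      rw [hrhs, hpop]
      have hred : (match some ((x, y), (d :: t).eraseIdx (psel d t).2) with
           | some ((x, y), rest) => if s > x then dragonsAltGo n (s + y) rest else "NO"
           | none => "NO") = if s > x then dragonsAltGo n (s + y) ((d :: t).eraseIdx (psel d t).2) else "NO" := rfl
      rw [hred]
      simp only [dragonsLoop]
      by_cases hsx : s > x
      · rw [if_pos hsx, if_pos hsx]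
        exact ih _ _ (by simp only [List.length_cons] at hlen hn; omega)
      · rw [if_neg hsx, if_neg hsx]

-- ===== VERDICT (by name: the statement is the Claim_ definition above) =====
theorem dragons_spec : Claim_equal_dragons := by
  intro s l _
  unfold Spec_dragons dragons dragons_alt
  exact loop_eq_go l.length l s le_rfl
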